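-- pv_equiv track=rewrite | github.com/StanislavVolodarskiy/cg_lib | cg_lib/utils.py | cyclic_pairs
-- ===== SOURCE A (Python) =====
-- def cyclic_pairs(seq):
--     it = iter(seq)
--     try:
--         first = next(it)
--     except StopIteration:
--         return
--     prev = first
--     for item in it:
--         yield prev, item
--         prev = item
--     yield prev, first
-- ===== SOURCE B (Python) =====
-- def cyclic_pairs(seq):
--     items = list(seq)
--     if not items:
--         return
--     yield from zip(items, items[1:] + items[:1])
-- ===== Notes on version B (the rewrite author's own statement) =====
-- stated objective: simpler
-- what changed: Replaces A's running-prev pointer with a trailing wrap-around yield by materializing the sequence once and zipping it with its rotation by one.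
import Mathlib
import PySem

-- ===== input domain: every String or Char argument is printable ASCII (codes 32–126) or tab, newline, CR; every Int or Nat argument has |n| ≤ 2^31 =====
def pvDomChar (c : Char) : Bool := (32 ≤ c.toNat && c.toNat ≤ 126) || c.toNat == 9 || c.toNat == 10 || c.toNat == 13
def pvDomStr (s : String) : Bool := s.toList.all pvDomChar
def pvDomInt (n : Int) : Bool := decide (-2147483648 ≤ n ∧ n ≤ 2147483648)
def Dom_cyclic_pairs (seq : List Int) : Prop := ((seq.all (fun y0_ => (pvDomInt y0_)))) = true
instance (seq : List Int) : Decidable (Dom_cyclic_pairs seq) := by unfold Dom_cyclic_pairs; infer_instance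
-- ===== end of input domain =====

-- B materializes the sequence and zips it with its rotation by one, replacing A's
-- running-prev loop and trailing wrap yield; objective: simpler. (Both Pythons are
-- generators; the ports compare the full lists they yield for finite input.)


-- ===== PORT A =====
-- the for-loop over the remaining iterator, carrying prev; the final wrap yield at []
def cyclicPairsLoop (first : Int) (prev : Int) : List Int → List (Int × Int)
  | [] => [(prev, first)]
  | item :: rest => (prev, item) :: cyclicPairsLoop first item rest

def cyclic_pairs (seq : List Int) : List (Int × Int) :=
  match seq with
  | [] => []                       -- next(it) raises StopIteration: generator yields nothing
  | first :: it => cyclicPairsLoop first first it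

-- ===== PORT B =====
def cyclic_pairs_alt (seq : List Int) : List (Int × Int) :=
  let items := seq
  if items = [] then []
  else items.zip (items.drop 1 ++ items.take 1)

-- ===== PRECONDITION & SPEC =====
def Spec_cyclic_pairs (seq : List Int) (out : List (Int × Int)) : Prop := out = cyclic_pairs_alt seq
instance (seq : List Int) (out : List (Int × Int)) : Decidable (Spec_cyclic_pairs seq out) := by unfold Spec_cyclic_pairs; infer_instance

-- ===== CLAIM (what is proved, stated in full; the proofs are below) =====
def Claim_equal_cyclic_pairs : Prop := ∀ (seq : List Int), Dom_cyclic_pairs seq → Spec_cyclic_pairs seq (cyclic_pairs seq)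

-- ===== LEMMAS AND PROOFS =====
theorem cyclicPairsLoop_eq_zip (first : Int) (rest : List Int) :
    ∀ prev : Int, cyclicPairsLoop first prev rest = (prev :: rest).zip (rest ++ [first]) := by
  induction rest with
  | nil => intro prev; simp [cyclicPairsLoop]
  | cons x xs ih => intro prev; simp [cyclicPairsLoop, ih x, List.zip]

-- ===== VERDICT (by name: the statement is the Claim_ definition above) =====
theorem cyclic_pairs_spec : Claim_equal_cyclic_pairs := by
  intro seq _
  unfold Spec_cyclic_pairs cyclic_pairs cyclic_pairs_alt
  match seq with
  | [] => rfl
  | first :: it => simp [cyclicPairsLoop_eq_zip]
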